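-- pv_equiv track=rewrite | github.com/cjw1090/achu | decompress.py | Full_Path
-- ===== SOURCE A (Python) =====
-- def Full_Path(serial,pathlist,processname):
--     fullpathname = ""
--     fullpathlist = []
--     pathlist = pathlist.split('\VOLUME')
--     for i in pathlist:
--         for key, value in serial.items():  # DLL list(참조목록) Fullpath,
--             if key.lower() in i: # i volume 경로
--                 full_path_name = i.split("}")[-1]
--                 if "\\DEVICE"  in full_path_name:
--                     continue
--                 else:
--                     fullpathlist.append(value+full_path_name)
--
--     for i in range(0, len(fullpathlist)):
--         if processname in fullpathlist[i]:
--             fullpathname = fullpathlist[i]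
--         else:
--             continue
--
--     return fullpathname
-- ===== SOURCE B (Python) =====
-- def Full_Path(serial, pathlist, processname):
--     # Search the candidates in reverse with early exit: the last match A keeps
--     # is the first match when scanning segments x keys back-to-front.
--     segments = pathlist.split('\VOLUME')
--     for i in reversed(segments):
--         for key, value in reversed(list(serial.items())):
--             if key.lower() in i:
--                 full_path_name = i.split("}")[-1]
--                 if "\\DEVICE" not in full_path_name:
--                     candidate = value + full_path_name
--                     if processname in candidate:
--                         return candidate
--     return ""
-- ===== Notes on version B (the rewrite author's own statement) =====
-- stated objective: alternative
-- what changed: Replaces A's two-pass scheme (materialize the full candidate list, then rescan it keeping the last entry containing processname) with a single reverse search over segments x keys that returns the first acceptable candidate early, building no intermediate list.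
import Mathlib
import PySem

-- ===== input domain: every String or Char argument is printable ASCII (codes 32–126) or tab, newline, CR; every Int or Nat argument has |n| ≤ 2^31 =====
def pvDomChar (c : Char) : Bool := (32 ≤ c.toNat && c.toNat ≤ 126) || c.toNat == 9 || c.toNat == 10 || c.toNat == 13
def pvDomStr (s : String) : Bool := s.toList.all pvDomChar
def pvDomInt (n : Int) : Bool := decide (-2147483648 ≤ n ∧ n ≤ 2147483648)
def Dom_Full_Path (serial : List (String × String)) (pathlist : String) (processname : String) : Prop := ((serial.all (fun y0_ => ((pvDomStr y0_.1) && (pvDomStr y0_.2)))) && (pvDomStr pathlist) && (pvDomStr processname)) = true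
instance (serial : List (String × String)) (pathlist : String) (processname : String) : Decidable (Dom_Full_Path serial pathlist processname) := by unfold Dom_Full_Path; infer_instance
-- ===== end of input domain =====

-- B replaces A's two passes (build the full candidate list, then rescan it for the last
-- match) by a single reverse search with early exit: scanning segments × keys back-to-front,
-- the first candidate containing processname is exactly A's last overwrite.


-- ===== PORT A =====
-- split? with sep ≠ "" is always some (getD [] is unreachable); literal transliteration of A: build fullpathlist over segments × serial.items(),
-- then index-scan it keeping the last entry containing processname.
-- i.split("}") is never empty, so the Python [-1] never raises; pyGetD "" is exact here.
def Full_Path (serial : List (String × String)) (pathlist : String) (processname : String) : String :=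
  let pathlist' := (PySem.Str.split? pathlist "\\VOLUME").getD []
  let fullpathlist : List String :=
    pathlist'.foldl (fun acc i =>
      ((PySem.Dict.ofList serial).items).foldl (fun acc2 kv =>
        if PySem.Str.isIn (PySem.Str.lower kv.1) i then
          let full_path_name := PySem.List.pyGetD ((PySem.Str.split? i "}").getD []) (-1) ""
          if PySem.Str.isIn "\\DEVICE" full_path_name then acc2
          else acc2 ++ [kv.2 ++ full_path_name]
        else acc2) acc) []
  (PySem.List.pyRange 0 (fullpathlist.length : Int) 1).foldl
    (fun fullpathname j =>
      if PySem.Str.isIn processname (PySem.List.pyGetD fullpathlist j "") then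
        PySem.List.pyGetD fullpathlist j ""
      else fullpathname) ""

-- ===== PORT B =====
-- B-side helper: scan the (already reversed) key/value list for segment i,
-- returning the first acceptable candidate containing processname.
def fpSegFind (items : List (String × String)) (i : String) (processname : String) : Option String :=
  match items with
  | [] => none
  | (k, v) :: rest =>
    if PySem.Str.isIn (PySem.Str.lower k) i then
      let full_path_name := PySem.List.pyGetD ((PySem.Str.split? i "}").getD []) (-1) ""
      if PySem.Str.isIn "\\DEVICE" full_path_name then fpSegFind rest i processname
      else
        let candidate := v ++ full_path_name
        if PySem.Str.isIn processname candidate then some candidate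
        else fpSegFind rest i processname
    else fpSegFind rest i processname

-- B-side helper: the outer loop over the (already reversed) segment list, early exit.
def fpFind (segs : List String) (items : List (String × String)) (processname : String) : Option String :=
  match segs with
  | [] => none
  | i :: rest => (fpSegFind items i processname).or (fpFind rest items processname)

def Full_Path_alt (serial : List (String × String)) (pathlist : String) (processname : String) : String :=
  (fpFind ((PySem.Str.split? pathlist "\\VOLUME").getD []).reverse
          ((PySem.Dict.ofList serial).items).reverse processname).getD ""

-- ===== PRECONDITION & SPEC =====
def Spec_Full_Path (serial : List (String × String)) (pathlist : String) (processname : String) (out : String) : Prop := out = Full_Path_alt serial pathlist processname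
instance (serial : List (String × String)) (pathlist : String) (processname : String) (out : String) : Decidable (Spec_Full_Path serial pathlist processname out) := by unfold Spec_Full_Path; infer_instance

-- ===== CLAIM (what is proved, stated in full; the proofs are below) =====
def Claim_equal_Full_Path : Prop := ∀ (serial : List (String × String)) (pathlist : String) (processname : String), Dom_Full_Path serial pathlist processname → Spec_Full_Path serial pathlist processname (Full_Path serial pathlist processname)

-- ===== LEMMAS AND PROOFS =====

-- the per-segment candidate list, in A's append order
def fpCands (items : List (String × String)) (i : String) : List String :=
  items.filterMap (fun kv =>
    if PySem.Str.isIn (PySem.Str.lower kv.1) i then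
      if PySem.Str.isIn "\\DEVICE" (PySem.List.pyGetD ((PySem.Str.split? i "}").getD []) (-1) "") then none
      else some (kv.2 ++ PySem.List.pyGetD ((PySem.Str.split? i "}").getD []) (-1) "")
    else none)

theorem fpCands_cons (kv : String × String) (rest : List (String × String)) (i : String) :
    fpCands (kv :: rest) i =
      (if PySem.Str.isIn (PySem.Str.lower kv.1) i then
        if PySem.Str.isIn "\\DEVICE" (PySem.List.pyGetD ((PySem.Str.split? i "}").getD []) (-1) "") then []
        else [kv.2 ++ PySem.List.pyGetD ((PySem.Str.split? i "}").getD []) (-1) ""]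
      else []) ++ fpCands rest i := by
  simp only [fpCands, List.filterMap_cons]
  split_ifs <;> simp

-- A's inner loop appends exactly fpCands
theorem fp_inner (items : List (String × String)) (i : String) (acc : List String) :
    items.foldl (fun acc2 kv =>
        if PySem.Str.isIn (PySem.Str.lower kv.1) i then
          if PySem.Str.isIn "\\DEVICE" (PySem.List.pyGetD ((PySem.Str.split? i "}").getD []) (-1) "") then acc2
          else acc2 ++ [kv.2 ++ PySem.List.pyGetD ((PySem.Str.split? i "}").getD []) (-1) ""]
        else acc2) acc = acc ++ fpCands items i := by
  induction items generalizing acc with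
  | nil => simp [fpCands]
  | cons kv rest ih =>
    simp only [List.foldl_cons]
    rw [fpCands_cons]
    by_cases h1 : PySem.Str.isIn (PySem.Str.lower kv.1) i
    · rw [if_pos h1, if_pos h1]
      by_cases h2 : PySem.Str.isIn "\\DEVICE" (PySem.List.pyGetD ((PySem.Str.split? i "}").getD []) (-1) "")
      · rw [if_pos h2, if_pos h2, List.nil_append]
        exact ih acc
      · rw [if_neg h2, if_neg h2, ih, List.append_assoc]
    · rw [if_neg h1, if_neg h1, List.nil_append]
      exact ih acc

-- A's outer loop collects the candidates of every segment, in order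
theorem fp_outer (segs : List String) (items : List (String × String)) (acc : List String) :
    segs.foldl (fun acc i =>
      items.foldl (fun acc2 kv =>
        if PySem.Str.isIn (PySem.Str.lower kv.1) i then
          if PySem.Str.isIn "\\DEVICE" (PySem.List.pyGetD ((PySem.Str.split? i "}").getD []) (-1) "") then acc2
          else acc2 ++ [kv.2 ++ PySem.List.pyGetD ((PySem.Str.split? i "}").getD []) (-1) ""]
        else acc2) acc) acc
    = acc ++ segs.flatMap (fun i => fpCands items i) := by
  induction segs generalizing acc with
  | nil => simp
  | cons i rest ih =>
    simp only [List.foldl_cons, List.flatMap_cons]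
    rw [fp_inner, ih, List.append_assoc]

-- the last kept candidate = first match of the reversed candidate list
theorem fp_last (p : String → Bool) (l : List String) (init : String) :
    l.foldl (fun acc x => if p x then x else acc) init
      = (l.reverse.find? p).getD init := by
  induction l generalizing init with
  | nil => simp
  | cons x xs ih =>
    simp only [List.foldl_cons, List.reverse_cons, List.find?_append, ih]
    cases hf : xs.reverse.find? p with
    | some y => simp [Option.or]
    | none => by_cases hp : p x <;> simp [Option.or, List.find?, hp]

-- fpSegFind is find? over fpCands
theorem fp_segfind (items : List (String × String)) (i pn : String) :
    fpSegFind items i pn = (fpCands items i).find? (PySem.Str.isIn pn) := by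
  induction items with
  | nil => simp [fpSegFind, fpCands]
  | cons kv rest ih =>
    obtain ⟨k, v⟩ := kv
    rw [fpCands_cons, List.find?_append]
    simp only [fpSegFind]
    by_cases h1 : PySem.Str.isIn (PySem.Str.lower k) i
    · rw [if_pos h1, if_pos h1]
      by_cases h2 : PySem.Str.isIn "\\DEVICE" (PySem.List.pyGetD ((PySem.Str.split? i "}").getD []) (-1) "")
      · rw [if_pos h2, if_pos h2]
        simp only [List.find?_nil, Option.none_or]
        exact ih
      · rw [if_neg h2, if_neg h2]
        by_cases h3 : PySem.Str.isIn pn (v ++ PySem.List.pyGetD ((PySem.Str.split? i "}").getD []) (-1) "")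
        · rw [if_pos h3, List.find?_cons_of_pos h3]
          simp [Option.or]
        · rw [if_neg h3, List.find?_cons_of_neg h3]
          simp only [List.find?_nil, Option.none_or]
          exact ih
    · rw [if_neg h1, if_neg h1]
      simp only [List.find?_nil, Option.none_or]
      exact ih

-- fpFind is find? over the flattened candidate lists
theorem fp_find (segs : List String) (items : List (String × String)) (pn : String) :
    fpFind segs items pn
      = (segs.flatMap (fun i => fpCands items i)).find? (PySem.Str.isIn pn) := by
  induction segs with
  | nil => simp [fpFind]
  | cons i rest ih =>
    simp only [fpFind, List.flatMap_cons, List.find?_append]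
    rw [fp_segfind, ih]

theorem fpCands_reverse (items : List (String × String)) (i : String) :
    fpCands items.reverse i = (fpCands items i).reverse := by
  simp [fpCands, List.filterMap_reverse]

theorem fp_rev (segs : List String) (items : List (String × String)) :
    segs.reverse.flatMap (fun i => fpCands items.reverse i)
      = (segs.flatMap (fun i => fpCands items i)).reverse := by
  simp only [fpCands_reverse]
  rw [List.flatMap_reverse]
  simp [Function.comp_def]

-- ===== VERDICT (by name: the statement is the Claim_ definition above) =====
theorem Full_Path_spec : Claim_equal_Full_Path := by
  intro serial pathlist processname _
  unfold Spec_Full_Path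
  simp only [Full_Path, Full_Path_alt]
  rw [fp_outer, List.nil_append]
  rw [PySem.List.foldl_pyRange_zero_pyGetD'
        (((PySem.Str.split? pathlist "\\VOLUME").getD []).flatMap
          (fun i => fpCands ((PySem.Dict.ofList serial).items) i)) ""
        (fun acc x => if PySem.Str.isIn processname x then x else acc) ""]
  rw [fp_last (PySem.Str.isIn processname)]
  rw [fp_find, fp_rev]
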